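-- pv_equiv track=rewrite | github.com/ayush-garg341/python | data_structures/modified_binary_search/check_array_sorted_rotated.py | check_if_sorted_from_current_pos
-- ===== SOURCE A (Python) =====
-- def check_if_sorted_from_current_pos(pos, nums):
--     n = len(nums)
--     i = 0
--     while i < n - 1:
--         if nums[(pos + 1) % n] < nums[pos % n]:
--             return False
--         pos += 1
--         i += 1
--     return True
-- ===== SOURCE B (Python) =====
-- def check_if_sorted_from_current_pos(pos, nums):
--     n = len(nums)
--     descents = [j for j in range(n) if nums[j] > nums[(j + 1) % n]]
--     return all(j == (pos - 1) % n for j in descents)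
-- ===== Notes on version B (the rewrite author's own statement) =====
-- stated objective: alternative
-- what changed: Instead of scanning n-1 pairs forward from pos with a mutating cursor and per-step index arithmetic in an interpreted while loop, B first builds the table of all circular descent positions with a list comprehension and then returns True iff every descent sits at (pos-1) % n, the one pair the window from pos skips.
import Mathlib
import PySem

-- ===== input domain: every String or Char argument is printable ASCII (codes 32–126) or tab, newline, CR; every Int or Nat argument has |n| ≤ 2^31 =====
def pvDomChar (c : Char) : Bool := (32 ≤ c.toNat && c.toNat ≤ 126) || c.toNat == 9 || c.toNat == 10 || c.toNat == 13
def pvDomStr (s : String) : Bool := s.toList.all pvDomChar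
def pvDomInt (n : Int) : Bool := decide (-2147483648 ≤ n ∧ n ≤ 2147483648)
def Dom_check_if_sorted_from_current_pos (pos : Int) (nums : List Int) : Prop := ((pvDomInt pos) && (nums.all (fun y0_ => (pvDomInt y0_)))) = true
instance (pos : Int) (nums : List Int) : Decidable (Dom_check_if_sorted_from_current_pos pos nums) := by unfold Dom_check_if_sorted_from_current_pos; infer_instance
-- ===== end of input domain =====

-- B replaces A's forward scan from pos (mutating cursor) by building the table of all
-- circular descent positions and checking every descent sits at (pos-1) % n; same O(n) cost.

-- ===== PORT A =====
-- the while loop: fuel = nums.length bounds the iterations (the loop runs at most n-1 times)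
def pvALoop (nums : List Int) (n : Int) (pos i : Int) : Nat → Bool
  | 0 => true
  | fuel + 1 =>
    if i < n - 1 then
      if PySem.List.pyGetD nums (PySem.Int.mod (pos + 1) n) 0 <
         PySem.List.pyGetD nums (PySem.Int.mod pos n) 0 then false
      else pvALoop nums n (pos + 1) (i + 1) fuel
    else true

def check_if_sorted_from_current_pos (pos : Int) (nums : List Int) : Bool :=
  pvALoop nums (nums.length : Int) pos 0 nums.length

-- ===== PORT B =====
def check_if_sorted_from_current_pos_alt (pos : Int) (nums : List Int) : Bool :=
  let n : Int := (nums.length : Int)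
  let descents : List Int := (PySem.List.pyRange 0 n 1).filter (fun j =>
    PySem.List.pyGetD nums (PySem.Int.mod (j + 1) n) 0 < PySem.List.pyGetD nums j 0)
  descents.all (fun j => j == PySem.Int.mod (pos - 1) n)

-- ===== PRECONDITION & SPEC =====
def Spec_check_if_sorted_from_current_pos (pos : Int) (nums : List Int) (out : Bool) : Prop := out = check_if_sorted_from_current_pos_alt pos nums
instance (pos : Int) (nums : List Int) (out : Bool) : Decidable (Spec_check_if_sorted_from_current_pos pos nums out) := by unfold Spec_check_if_sorted_from_current_pos; infer_instance

-- ===== CLAIM (what is proved, stated in full; the proofs are below) =====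
def Claim_equal_check_if_sorted_from_current_pos : Prop := ∀ (pos : Int) (nums : List Int), Dom_check_if_sorted_from_current_pos pos nums → Spec_check_if_sorted_from_current_pos pos nums (check_if_sorted_from_current_pos pos nums)

-- ===== LEMMAS AND PROOFS =====

-- characterisation of A's loop: true iff no descent at (pos+k) % n for any step k the loop reaches
lemma pvALoop_char (nums : List Int) (n : Int) :
    ∀ (fuel : Nat) (pos i : Int), pvALoop nums n pos i fuel = true ↔
      ∀ k : Nat, k < fuel → i + (k : Int) < n - 1 →
        ¬ (PySem.List.pyGetD nums (PySem.Int.mod (pos + (k : Int) + 1) n) 0 <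
           PySem.List.pyGetD nums (PySem.Int.mod (pos + (k : Int)) n) 0) := by
  intro fuel
  induction fuel with
  | zero => intro pos i; simp [pvALoop]
  | succ f ih =>
    intro pos i
    by_cases hi : i < n - 1
    · by_cases hc : PySem.List.pyGetD nums (PySem.Int.mod (pos + 1) n) 0 <
          PySem.List.pyGetD nums (PySem.Int.mod pos n) 0
      · simp only [pvALoop, if_pos hi, if_pos hc]
        constructor
        · intro h; exact absurd h (by simp)
        · intro h
          exact absurd hc (by simpa using h 0 (Nat.succ_pos f) (by simpa using hi))
      · simp only [pvALoop, if_pos hi, if_neg hc, ih]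
        constructor
        · intro h k hk hkn
          cases k with
          | zero => simpa using hc
          | succ m =>
            have := h m (Nat.lt_of_succ_lt_succ hk) (by push_cast at hkn ⊢; omega)
            convert this using 4 <;> push_cast <;> ring
        · intro h k hk hkn
          have := h (k + 1) (Nat.succ_lt_succ hk) (by push_cast at hkn ⊢; omega)
          convert this using 4 <;> push_cast <;> ring
    · simp only [pvALoop, if_neg hi]
      constructor
      · intro _ k _ hkn
        exact absurd hkn (by have : (0:Int) ≤ (k:Int) := Int.natCast_nonneg k; omega)
      · intro _; trivial

-- characterisation of B: true iff every descent index j in [0,n) equals (pos-1) % n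
lemma alt_char (pos : Int) (nums : List Int) :
    check_if_sorted_from_current_pos_alt pos nums = true ↔
      ∀ j : Int, 0 ≤ j → j < (nums.length : Int) →
        PySem.List.pyGetD nums (PySem.Int.mod (j + 1) (nums.length : Int)) 0 <
          PySem.List.pyGetD nums j 0 →
        j = PySem.Int.mod (pos - 1) (nums.length : Int) := by
  simp [check_if_sorted_from_current_pos_alt, List.all_eq_true,
    PySem.List.mem_pyRange_one]
  constructor
  · intro h j h0 h1 hlt
    rcases h j h0 h1 with h' | h'
    · omega
    · exact h'
  · intro h j h0 h1
    by_cases hlt : PySem.List.pyGetD nums (PySem.Int.mod (j + 1) (nums.length : Int)) 0 <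
        PySem.List.pyGetD nums j 0
    · exact Or.inr (h j h0 h1 hlt)
    · exact Or.inl (by omega)

-- (a + b % n) % n = (a + b) % n, used to move the cursor's residue in and out of emod
lemma emod_add_absorb (a b n : Int) : (a + b % n) % n = (a + b) % n := by
  rw [Int.add_emod, Int.emod_emod_of_dvd _ dvd_rfl, ← Int.add_emod]

-- the bijection k ↦ (pos+k) % n between A's scanned steps and B's descent candidates ≠ (pos-1) % n
lemma bridge (g : Int → Int) (m : Nat) (pos : Int) (hm : 0 < m) :
    (∀ k : Nat, k < m → 0 + (k : Int) < (m : Int) - 1 →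
        ¬ (g ((pos + (k : Int) + 1) % (m : Int)) < g ((pos + (k : Int)) % (m : Int))))
    ↔ (∀ j : Int, 0 ≤ j → j < (m : Int) → g ((j + 1) % (m : Int)) < g j →
        j = (pos - 1) % (m : Int)) := by
  set n : Int := (m : Int) with hn'
  have hn : 0 < n := by rw [hn']; exact_mod_cast hm
  have hnne : n ≠ 0 := ne_of_gt hn
  constructor
  · intro h j h0 hjn hdesc
    by_contra hne
    have hk0 : 0 ≤ (j - pos) % n := Int.emod_nonneg _ hnne
    have hkn : (j - pos) % n < n := Int.emod_lt_of_pos _ hn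
    set k : Nat := ((j - pos) % n).toNat with hk'
    have hkv : (k : Int) = (j - pos) % n := Int.toNat_of_nonneg hk0
    have hjj : j % n = j := Int.emod_eq_of_lt h0 hjn
    have hne' : (j - pos) % n ≠ n - 1 := by
      intro hlast
      apply hne
      have : (j - (pos - 1)) % n = 0 := by
        have hrw : (j - (pos - 1)) = (j - pos) + 1 := by ring
        rw [hrw]
        calc ((j - pos) + 1) % n = ((j - pos) % n + 1) % n := by
              rw [add_comm ((j - pos) % n) 1, emod_add_absorb, add_comm]
          _ = n % n := by rw [hlast]; ring_nf
          _ = 0 := Int.emod_self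
      have := (Int.emod_eq_emod_iff_emod_sub_eq_zero).mpr this
      rwa [hjj] at this
    have hpk : (pos + (k : Int)) % n = j := by
      rw [hkv, emod_add_absorb]
      have : pos + (j - pos) = j := by ring
      rw [this, hjj]
    have hpk1 : (pos + (k : Int) + 1) % n = (j + 1) % n := by
      have : pos + (k : Int) + 1 = (pos + 1) + (k : Int) := by ring
      rw [this, hkv, emod_add_absorb]
      congr 1; ring
    exact h k (by omega) (by omega) (by rw [hpk, hpk1]; exact hdesc)
  · intro h k hkm hk1 hdesc
    set j : Int := (pos + (k : Int)) % n with hj'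
    have h0 : 0 ≤ j := Int.emod_nonneg _ hnne
    have hjn : j < n := Int.emod_lt_of_pos _ hn
    have hj1 : (j + 1) % n = (pos + (k : Int) + 1) % n := by
      rw [hj', add_comm j 1, emod_add_absorb]
      congr 1; ring
    have heq : j = (pos - 1) % n := h j h0 hjn (by rw [hj1]; exact hdesc)
    have hzero : ((pos + (k : Int)) - (pos - 1)) % n = 0 :=
      (Int.emod_eq_emod_iff_emod_sub_eq_zero).mp (hj' ▸ heq)
    have hsimp : (pos + (k : Int)) - (pos - 1) = (k : Int) + 1 := by ring
    rw [hsimp] at hzero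
    have hdvd : n ∣ (k : Int) + 1 := Int.dvd_of_emod_eq_zero hzero
    have : n ≤ (k : Int) + 1 := Int.le_of_dvd (by positivity) hdvd
    omega

-- ===== VERDICT (by name: the statement is the Claim_ definition above) =====
theorem check_if_sorted_from_current_pos_spec : Claim_equal_check_if_sorted_from_current_pos := by
  intro pos nums _
  unfold Spec_check_if_sorted_from_current_pos
  cases hm : nums.length with
  | zero =>
    have hnil : nums = [] := List.length_eq_zero_iff.mp hm
    subst hnil
    simp [check_if_sorted_from_current_pos, check_if_sorted_from_current_pos_alt,
      pvALoop, PySem.List.pyRange_one_eq_nil]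
  | succ m' =>
    have hm0 : 0 < nums.length := by omega
    have hn : (0 : Int) < (nums.length : Int) := by exact_mod_cast hm0
    rw [Bool.eq_iff_iff]
    unfold check_if_sorted_from_current_pos
    rw [pvALoop_char, alt_char]
    have hmod : ∀ a : Int, PySem.Int.mod a (nums.length : Int) = a % (nums.length : Int) :=
      fun a => PySem.Int.mod_eq_emod_of_pos hn
    simp only [hmod]
    exact bridge (fun x => PySem.List.pyGetD nums x 0) nums.length pos hm0
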